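-- pv_equiv track=rewrite | github.com/TristanBester/pycrm | experiments/complexity/lib/automata/rm/rm.py | _compute_rm_transitions
-- ===== SOURCE A (Python) =====
-- def _compute_rm_transitions(max_n: int = 3) -> dict:
--     """Compute the RM transitions."""
--     delta_u = {
--         (("M",), 0): 1,
--         (("E",), 0): 0,
--         (("C",), 0): 0,
--         (("P",), 0): 0,
--         (("*",), 0): -1,
--         ((), 0): 0,
--     }
--     state_counter = 1
--
--     for i in range(1, max_n + 1):
--         delta_u |= {
--             (("M",), state_counter): state_counter + 1 + 2 * i,
--             (("E",), state_counter): state_counter + 1,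
--             (("C",), state_counter): state_counter,
--             (("P",), state_counter): state_counter,
--             (("*",), state_counter): -1,
--             ((), state_counter): state_counter,
--         }
--         state_counter += 1
--
--         for _ in range(i):
--             delta_u |= {
--                 (("M",), state_counter): state_counter,
--                 (("E",), state_counter): state_counter,
--                 (("C",), state_counter): state_counter + 1,
--                 (("P",), state_counter): state_counter,
--                 (("*",), state_counter): -1,
--                 ((), state_counter): state_counter,
--             }
--             state_counter += 1
--
--         for _ in range(i):
--             delta_u |= {
--                 (("M",), state_counter): state_counter,
--                 (("E",), state_counter): state_counter,
--                 (("C",), state_counter): state_counter,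
--                 (("P",), state_counter): state_counter + 1,
--                 (("*",), state_counter): -1,
--                 ((), state_counter): state_counter,
--             }
--             state_counter += 1
--
--         delta_u[(("P",), state_counter - 1)] = -1
--
--     for i in delta_u:
--         if delta_u[i] == -1:
--             delta_u[i] = state_counter
--     return delta_u
-- ===== SOURCE B (Python) =====
-- def _compute_rm_transitions(max_n: int = 3) -> dict:
--     """Compute the RM transitions in one constructive pass.
--
--     States group into blocks: block i (1 <= i <= max_n) occupies states
--     i*i .. i*i + 2*i (one M-state, i C-stage states, i P-stage states), so the
--     absorbing "dead" state is (m + 1) ** 2 with m = max(max_n, 0).  Knowing the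
--     dead state up front, every transition target is emitted directly and no
--     second rewriting pass is needed.
--     """
--     m = max_n if max_n > 0 else 0
--     dead = (m + 1) * (m + 1)
--     entries = []
--     i = 0
--     for s in range(dead):
--         if s == (i + 1) * (i + 1):
--             i += 1
--         r = s - i * i
--         if s == 0:
--             mt, et, ct, pt = 1, 0, 0, 0
--         elif r == 0:
--             mt, et, ct, pt = s + 1 + 2 * i, s + 1, s, s
--         elif r <= i:
--             mt, et, ct, pt = s, s, s + 1, s
--         elif r < 2 * i:
--             mt, et, ct, pt = s, s, s, s + 1
--         else:
--             mt, et, ct, pt = s, s, s, dead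
--         entries += [((("M",), s), mt), ((("E",), s), et), ((("C",), s), ct),
--                     ((("P",), s), pt), ((("*",), s), dead), (((), s), s)]
--     return dict(entries)
-- ===== Notes on version B (the rewrite author's own statement) =====
-- stated objective: alternative
-- what changed: B computes the absorbing state (max(max_n,0)+1)^2 in closed form and builds the dict in one flat loop over the states, classifying each state arithmetically within its block and writing every final transition target directly, so A's in-place override of the last P-transition and A's whole second sweep replacing the placeholder sentinel values disappear.
import Mathlib
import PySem

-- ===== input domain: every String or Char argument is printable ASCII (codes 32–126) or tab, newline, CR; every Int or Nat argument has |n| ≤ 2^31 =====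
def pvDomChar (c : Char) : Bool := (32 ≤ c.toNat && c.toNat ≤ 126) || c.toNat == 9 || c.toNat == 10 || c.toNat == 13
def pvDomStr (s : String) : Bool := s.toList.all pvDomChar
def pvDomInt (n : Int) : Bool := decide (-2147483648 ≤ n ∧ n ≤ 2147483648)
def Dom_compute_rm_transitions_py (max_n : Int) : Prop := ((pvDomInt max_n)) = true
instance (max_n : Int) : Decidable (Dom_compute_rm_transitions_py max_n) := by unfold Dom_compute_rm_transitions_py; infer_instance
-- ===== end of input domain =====

-- B precomputes the absorbing "dead" state (max(max_n,0)+1)^2 in closed form and emits every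
-- transition's final target in a single constructive pass over the states, so A's trailing
-- override of the last P-transition and A's whole second sweep rewriting the
-- placeholder sentinel values disappear (objective: alternative single-pass construction, similar cost).

-- ===== PORT A =====
-- the initial dict literal for state 0
def aInit : PySem.Dict (List String × Int) Int :=
  PySem.Dict.ofList [((["M"], 0), 1), ((["E"], 0), 0), ((["C"], 0), 0),
                     ((["P"], 0), 0), ((["*"], 0), -1), (([], 0), 0)]

-- body of A's first inner loop (the C-stage states); state = (delta_u, state_counter)
def aCStep (st : PySem.Dict (List String × Int) Int × Int) (_ : Int) :
    PySem.Dict (List String × Int) Int × Int :=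
  ((((((st.1.insert (["M"], st.2) st.2).insert (["E"], st.2) st.2).insert
      (["C"], st.2) (st.2 + 1)).insert (["P"], st.2) st.2).insert
      (["*"], st.2) (-1)).insert ([], st.2) st.2, st.2 + 1)

-- body of A's second inner loop (the P-stage states)
def aPStep (st : PySem.Dict (List String × Int) Int × Int) (_ : Int) :
    PySem.Dict (List String × Int) Int × Int :=
  ((((((st.1.insert (["M"], st.2) st.2).insert (["E"], st.2) st.2).insert
      (["C"], st.2) st.2).insert (["P"], st.2) (st.2 + 1)).insert
      (["*"], st.2) (-1)).insert ([], st.2) st.2, st.2 + 1)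

-- body of A's outer loop over i
def aBlock (st : PySem.Dict (List String × Int) Int × Int) (i : Int) :
    PySem.Dict (List String × Int) Int × Int :=
  let d := (((((st.1.insert (["M"], st.2) (st.2 + 1 + 2 * i)).insert
      (["E"], st.2) (st.2 + 1)).insert (["C"], st.2) st.2).insert
      (["P"], st.2) st.2).insert (["*"], st.2) (-1)).insert ([], st.2) st.2
  let st1 := (PySem.List.pyRange 0 i).foldl aCStep (d, st.2 + 1)
  let st2 := (PySem.List.pyRange 0 i).foldl aPStep st1
  (st2.1.insert (["P"], st2.2 - 1) (-1), st2.2)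

def compute_rm_transitions_py (max_n : Int) : List (List String × Int × Int) :=
  let st := (PySem.List.pyRange 1 (max_n + 1)).foldl aBlock (aInit, 1)
  -- final sweep: every value -1 is rewritten to state_counter (values mapped in place)
  (st.1.items.map (fun kv => if kv.2 = -1 then (kv.1, st.2) else kv)).map
    (fun kv => (kv.1.1, kv.1.2, kv.2))

-- ===== PORT B =====
-- body of B's single loop over the states s; state = (entries, i)
def bStep (dead : Int) (st : List ((List String × Int) × Int) × Int) (s : Int) :
    List ((List String × Int) × Int) × Int :=
  let i := if s == (st.2 + 1) * (st.2 + 1) then st.2 + 1 else st.2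
  let r := s - i * i
  let t : Int × Int × Int × Int :=
    if s == 0 then (1, 0, 0, 0)
    else if r == 0 then (s + 1 + 2 * i, s + 1, s, s)
    else if r ≤ i then (s, s, s + 1, s)
    else if r < 2 * i then (s, s, s, s + 1)
    else (s, s, s, dead)
  (st.1 ++ [((["M"], s), t.1), ((["E"], s), t.2.1), ((["C"], s), t.2.2.1),
            ((["P"], s), t.2.2.2), ((["*"], s), dead), (([], s), s)], i)

def compute_rm_transitions_py_alt (max_n : Int) : List (List String × Int × Int) :=
  let m := if max_n > 0 then max_n else 0
  let dead := (m + 1) * (m + 1)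
  let st := (PySem.List.pyRange 0 dead).foldl (bStep dead) ([], 0)
  (PySem.Dict.ofList st.1).items.map (fun kv => (kv.1.1, kv.1.2, kv.2))

-- ===== PRECONDITION & SPEC =====
def Spec_compute_rm_transitions_py (max_n : Int) (out : List (List String × Int × Int)) : Prop := out = compute_rm_transitions_py_alt max_n
instance (max_n : Int) (out : List (List String × Int × Int)) : Decidable (Spec_compute_rm_transitions_py max_n out) := by unfold Spec_compute_rm_transitions_py; infer_instance

-- ===== CLAIM (what is proved, stated in full; the proofs are below) =====
def Claim_equal_compute_rm_transitions_py : Prop := ∀ (max_n : Int), Dom_compute_rm_transitions_py max_n → Spec_compute_rm_transitions_py max_n (compute_rm_transitions_py max_n)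

-- ===== LEMMAS AND PROOFS =====

-- the six dict entries written for one state s
def rmRow (s mt et ct pt star : Int) : List ((List String × Int) × Int) :=
  [((["M"], s), mt), ((["E"], s), et), ((["C"], s), ct),
   ((["P"], s), pt), ((["*"], s), star), (([], s), s)]

-- the rows of n consecutive C-stage states starting at s (with A's -1 sentinel)
def cRun (s : Int) : Nat → List ((List String × Int) × Int)
  | 0 => []
  | n + 1 => rmRow s s s (s + 1) s (-1) ++ cRun (s + 1) n

-- the rows of n consecutive P-stage states starting at s, before A's override
def pRun (s : Int) : Nat → List ((List String × Int) × Int)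
  | 0 => []
  | n + 1 => rmRow s s s s (s + 1) (-1) ++ pRun (s + 1) n

-- the same rows after A's override of the last P-transition
def pRunA (s : Int) : Nat → List ((List String × Int) × Int)
  | 0 => []
  | n + 1 => pRun s n ++ rmRow (s + n) (s + n) (s + n) (s + n) (-1) (-1)

-- all rows of block i (one M-state, i C-stage, i P-stage states) based at s
def blockA (i : Nat) (s : Int) : List ((List String × Int) × Int) :=
  rmRow s (s + 1 + 2 * i) (s + 1) s s (-1) ++ cRun (s + 1) i ++ pRunA (s + 1 + i) i

-- A's whole item list (with -1 sentinels) after blocks 1..m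
def spine : Nat → List ((List String × Int) × Int)
  | 0 => rmRow 0 1 0 0 0 (-1)
  | m + 1 => spine m ++ blockA (m + 1) (((m : Int) + 1) * ((m : Int) + 1))

-- the value rewrite of A's final sweep
def subst (dead : Int) (kv : (List String × Int) × Int) : (List String × Int) × Int :=
  if kv.2 = -1 then (kv.1, dead) else kv

theorem map_subst_rmRow (dead s mt et ct pt : Int)
    (h1 : mt ≠ -1) (h2 : et ≠ -1) (h3 : ct ≠ -1) (h4 : pt ≠ -1) (h5 : s ≠ -1) :
    (rmRow s mt et ct pt (-1)).map (subst dead)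
      = [((["M"], s), mt), ((["E"], s), et), ((["C"], s), ct),
         ((["P"], s), pt), ((["*"], s), dead), (([], s), s)] := by
  simp [rmRow, subst, h1, h2, h3, h4, h5]

theorem map_subst_rmRow_last (dead t : Int) (h : t ≠ -1) :
    (rmRow t t t t (-1) (-1)).map (subst dead)
      = [((["M"], t), t), ((["E"], t), t), ((["C"], t), t),
         ((["P"], t), dead), ((["*"], t), dead), (([], t), t)] := by
  simp [rmRow, subst, h]

theorem mem_rmRow_snd {p} {s mt et ct pt star : Int} (h : p ∈ rmRow s mt et ct pt star) :
    p.1.2 = s := by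
  simp [rmRow] at h
  rcases h with h | h | h | h | h | h <;> subst h <;> rfl

theorem mem_cRun_snd {p} {s : Int} {n : Nat} (h : p ∈ cRun s n) :
    s ≤ p.1.2 ∧ p.1.2 < s + n := by
  induction n generalizing s with
  | zero => simp [cRun] at h
  | succ n ih =>
    simp only [cRun, List.mem_append] at h
    rcases h with h | h
    · have := mem_rmRow_snd h; omega
    · have := ih h; push_cast; omega

theorem mem_pRun_snd {p} {s : Int} {n : Nat} (h : p ∈ pRun s n) :
    s ≤ p.1.2 ∧ p.1.2 < s + n := by
  induction n generalizing s with
  | zero => simp [pRun] at h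
  | succ n ih =>
    simp only [pRun, List.mem_append] at h
    rcases h with h | h
    · have := mem_rmRow_snd h; omega
    · have := ih h; push_cast; omega

theorem mem_pRunA_snd {p} {s : Int} {n : Nat} (h : p ∈ pRunA s n) :
    s ≤ p.1.2 ∧ p.1.2 < s + n := by
  cases n with
  | zero => simp [pRunA] at h
  | succ n =>
    simp only [pRunA, List.mem_append] at h
    rcases h with h | h
    · have := mem_pRun_snd h; omega
    · have := mem_rmRow_snd h; push_cast; omega

theorem mem_blockA_snd {p} {i : Nat} {s : Int} (h : p ∈ blockA i s) :
    s ≤ p.1.2 ∧ p.1.2 < s + 1 + 2 * i := by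
  simp only [blockA, List.mem_append] at h
  rcases h with (h | h) | h
  · have := mem_rmRow_snd h; omega
  · have := mem_cRun_snd h; omega
  · have := mem_pRunA_snd h; omega

theorem mem_spine_snd {p} {m : Nat} (h : p ∈ spine m) :
    0 ≤ p.1.2 ∧ p.1.2 < ((m : Int) + 1) * ((m : Int) + 1) := by
  induction m with
  | zero => have := mem_rmRow_snd h; norm_num [this]
  | succ m ih =>
    have hm : (0 : Int) ≤ (m : Int) := by positivity
    simp only [spine, List.mem_append] at h
    rcases h with h | h
    · have := ih h; push_cast
      exact ⟨this.1, by nlinarith [this.2]⟩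
    · have := mem_blockA_snd h; push_cast at this ⊢
      exact ⟨by nlinarith [this.1], by nlinarith [this.2]⟩

theorem insert_fresh {L : List ((List String × Int) × Int)} {k : List String × Int} (v : Int)
    (h : L.any (fun p => p.1 == k) = false) :
    (PySem.Dict.mk L).insert k v = PySem.Dict.mk (L ++ [(k, v)]) := by
  simp [PySem.Dict.insert, PySem.Dict.contains, h]

-- inserting the six fresh keys of one state appends its row
theorem insert_row (L : List ((List String × Int) × Int)) (s mt et ct pt star : Int)
    (h : ∀ p ∈ L, p.1.2 ≠ s) :
    ((((((PySem.Dict.mk L).insert (["M"], s) mt).insert (["E"], s) et).insert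
        (["C"], s) ct).insert (["P"], s) pt).insert (["*"], s) star).insert ([], s) s
      = PySem.Dict.mk (L ++ rmRow s mt et ct pt star) := by
  have hL : ∀ t : List String, L.any (fun p => p.1 == (t, s)) = false := by
    intro t
    simp only [List.any_eq_false]
    intro p hp he
    have he' : p.1 = (t, s) := by simpa using he
    exact h p hp (congrArg Prod.snd he')
  rw [insert_fresh mt (hL _), insert_fresh et ?_, insert_fresh ct ?_,
      insert_fresh pt ?_, insert_fresh star ?_, insert_fresh s ?_]
  · simp [rmRow]
  all_goals simp [List.any_append, hL]

-- A's override of the last P-transition rewrites exactly that entry in place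
theorem insert_override (L : List ((List String × Int) × Int)) (t mt et ct pt star : Int)
    (h : ∀ p ∈ L, p.1.2 ≠ t) :
    (PySem.Dict.mk (L ++ rmRow t mt et ct pt star)).insert (["P"], t) (-1)
      = PySem.Dict.mk (L ++ rmRow t mt et ct (-1) star) := by
  have hLmap : L.map (fun p => if p.1 = ((["P"], t) : List String × Int)
      then (((["P"], t) : List String × Int), (-1 : Int)) else p) = L := by
    conv_rhs => rw [← List.map_id L]
    apply List.map_congr_left
    intro p hp
    have hne : p.1 ≠ (["P"], t) := fun he => h p hp (congrArg Prod.snd he)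
    simp [hne]
  simp [PySem.Dict.insert, PySem.Dict.contains, rmRow, hLmap]

theorem cLoop (n : Nat) (L : List ((List String × Int) × Int)) (sc : Int)
    (h : ∀ p ∈ L, p.1.2 < sc) (l : List Int) (hl : l.length = n) :
    l.foldl aCStep (PySem.Dict.mk L, sc) = (PySem.Dict.mk (L ++ cRun sc n), sc + n) := by
  induction l generalizing L sc n with
  | nil => simp at hl; subst hl; simp [cRun]
  | cons a l ih =>
    cases n with
    | zero => simp at hl
    | succ n =>
      simp only [List.length_cons, Nat.succ.injEq] at hl
      have hstep : aCStep (PySem.Dict.mk L, sc) a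
          = (PySem.Dict.mk (L ++ rmRow sc sc sc (sc + 1) sc (-1)), sc + 1) := by
        simp only [aCStep]
        rw [insert_row L sc sc sc (sc + 1) sc (-1) (fun p hp => by have := h p hp; omega)]
      have hfresh : ∀ p ∈ L ++ rmRow sc sc sc (sc + 1) sc (-1), p.1.2 < sc + 1 := by
        intro p hp
        rcases List.mem_append.mp hp with hp | hp
        · have := h p hp; omega
        · have := mem_rmRow_snd hp; omega
      rw [List.foldl_cons, hstep, ih n _ (sc + 1) hfresh hl, cRun, List.append_assoc]
      congr 1
      push_cast; ring

theorem pLoop (n : Nat) (L : List ((List String × Int) × Int)) (sc : Int)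
    (h : ∀ p ∈ L, p.1.2 < sc) (l : List Int) (hl : l.length = n) :
    l.foldl aPStep (PySem.Dict.mk L, sc) = (PySem.Dict.mk (L ++ pRun sc n), sc + n) := by
  induction l generalizing L sc n with
  | nil => simp at hl; subst hl; simp [pRun]
  | cons a l ih =>
    cases n with
    | zero => simp at hl
    | succ n =>
      simp only [List.length_cons, Nat.succ.injEq] at hl
      have hstep : aPStep (PySem.Dict.mk L, sc) a
          = (PySem.Dict.mk (L ++ rmRow sc sc sc sc (sc + 1) (-1)), sc + 1) := by
        simp only [aPStep]
        rw [insert_row L sc sc sc sc (sc + 1) (-1) (fun p hp => by have := h p hp; omega)]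
      have hfresh : ∀ p ∈ L ++ rmRow sc sc sc sc (sc + 1) (-1), p.1.2 < sc + 1 := by
        intro p hp
        rcases List.mem_append.mp hp with hp | hp
        · have := h p hp; omega
        · have := mem_rmRow_snd hp; omega
      rw [List.foldl_cons, hstep, ih n _ (sc + 1) hfresh hl, pRun, List.append_assoc]
      congr 1
      push_cast; ring

theorem pRun_snoc (s : Int) (n : Nat) :
    pRun s (n + 1) = pRun s n ++ rmRow (s + n) (s + n) (s + n) (s + n) (s + n + 1) (-1) := by
  induction n generalizing s with
  | zero => simp [pRun]
  | succ n ih =>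
    rw [pRun, ih (s + 1), pRun, List.append_assoc]
    push_cast
    ring_nf

theorem pyRange_len (i : Nat) : (PySem.List.pyRange 0 (i : Int)).length = i := by
  rw [PySem.List.pyRange_zero_natCast]; simp

theorem aBlock_eq (L : List ((List String × Int) × Int)) (sc : Int) (i : Nat) (hi : 1 ≤ i)
    (h : ∀ p ∈ L, p.1.2 < sc) :
    aBlock (PySem.Dict.mk L, sc) (i : Int)
      = (PySem.Dict.mk (L ++ blockA i sc), sc + 1 + 2 * i) := by
  obtain ⟨k, rfl⟩ : ∃ k, i = k + 1 := ⟨i - 1, (Nat.succ_pred_eq_of_pos hi).symm⟩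
  simp only [aBlock]
  rw [insert_row L sc (sc + 1 + 2 * ((k + 1 : Nat) : Int)) (sc + 1) sc sc (-1)
      (fun p hp => by have := h p hp; omega)]
  have h1 : ∀ p ∈ L ++ rmRow sc (sc + 1 + 2 * ((k + 1 : Nat) : Int)) (sc + 1) sc sc (-1),
      p.1.2 < sc + 1 := by
    intro p hp
    rcases List.mem_append.mp hp with hp | hp
    · have := h p hp; omega
    · have := mem_rmRow_snd hp; omega
  rw [cLoop (k + 1) _ (sc + 1) h1 _ (pyRange_len (k + 1))]
  have h2 : ∀ p ∈ L ++ rmRow sc (sc + 1 + 2 * ((k + 1 : Nat) : Int)) (sc + 1) sc sc (-1)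
      ++ cRun (sc + 1) (k + 1), p.1.2 < sc + 1 + ((k + 1 : Nat) : Int) := by
    intro p hp
    rcases List.mem_append.mp hp with hp | hp
    · have := h1 p hp; omega
    · have := mem_cRun_snd hp; omega
  rw [pLoop (k + 1) _ _ h2 _ (pyRange_len (k + 1))]
  rw [pRun_snoc]
  rw [← List.append_assoc]
  have he : sc + 1 + ((k + 1 : Nat) : Int) + ((k + 1 : Nat) : Int) - 1
      = sc + 1 + ((k + 1 : Nat) : Int) + (k : Int) := by push_cast; ring
  have he2 : sc + 1 + ((k + 1 : Nat) : Int) + (k : Int)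
      = sc + 1 + ((k + 1 : Nat) : Int) + (k : Int) + 1 - 1 := by ring
  rw [he]
  dsimp only
  have hfr : ∀ p ∈ L ++ rmRow sc (sc + 1 + 2 * ((k + 1 : Nat) : Int)) (sc + 1) sc sc (-1)
      ++ cRun (sc + 1) (k + 1) ++ pRun (sc + 1 + ((k + 1 : Nat) : Int)) k,
      p.1.2 ≠ sc + 1 + ((k + 1 : Nat) : Int) + (k : Int) := by
    intro p hp
    rcases List.mem_append.mp hp with hp | hp
    · have := h2 p hp; push_cast at this ⊢; omega
    · have := mem_pRun_snd hp; push_cast at this ⊢; omega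
  rw [insert_override _ (sc + 1 + ((k + 1 : Nat) : Int) + (k : Int))
      (sc + 1 + ((k + 1 : Nat) : Int) + (k : Int)) (sc + 1 + ((k + 1 : Nat) : Int) + (k : Int))
      (sc + 1 + ((k + 1 : Nat) : Int) + (k : Int)) (sc + 1 + ((k + 1 : Nat) : Int) + (k : Int) + 1)
      (-1) hfr]
  congr 1
  · simp only [blockA, pRunA, ← List.append_assoc]
  · push_cast; ring

theorem aOuter (m : Nat) :
    (PySem.List.pyRange 1 ((m : Int) + 1)).foldl aBlock (aInit, 1)
      = (PySem.Dict.mk (spine m), ((m : Int) + 1) * ((m : Int) + 1)) := by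
  induction m with
  | zero => decide
  | succ m ih =>
    have h1 : (1 : Int) ≤ (m : Int) + 1 := by omega
    rw [show ((m + 1 : Nat) : Int) + 1 = ((m : Int) + 1) + 1 by push_cast; ring,
        PySem.List.pyRange_one_succ_right h1, List.foldl_append, ih]
    rw [show ((m : Int) + 1) = ((m + 1 : Nat) : Int) by push_cast; ring]
    simp only [List.foldl_cons, List.foldl_nil]
    rw [aBlock_eq (spine m) _ (m + 1) (by omega)
        (fun p hp => by have := (mem_spine_snd hp).2; push_cast at this ⊢; nlinarith)]
    congr 1
    push_cast; ring

theorem bCRun (k : Nat) (i s dead : Int) (acc : List ((List String × Int) × Int))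
    (_hi : 0 ≤ i) (hs : i * i < s) (hk : s + k ≤ i * i + i + 1) :
    (PySem.List.pyRange s (s + k)).foldl (bStep dead) (acc, i)
      = (acc ++ (cRun s k).map (subst dead), i) := by
  induction k generalizing s acc with
  | zero =>
    rw [show s + ((0 : Nat) : Int) = s by push_cast; ring, PySem.List.pyRange_one_eq_nil le_rfl]
    simp [cRun]
  | succ k ih =>
    have hk1 : (1 : Int) ≤ ((k + 1 : Nat) : Int) := by push_cast; omega
    push_cast at hk
    have hs' : s ≤ i * i + i := by linarith
    have hsq : (i + 1) * (i + 1) = i * i + 2 * i + 1 := by ring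
    have hc1 : (s == (i + 1) * (i + 1)) = false := by
      simp only [beq_eq_false_iff_ne]; intro he; rw [hsq] at he; linarith
    have hc2 : (s == 0) = false := by
      simp only [beq_eq_false_iff_ne]; intro he; nlinarith
    have hc3 : (s - i * i == 0) = false := by
      simp only [beq_eq_false_iff_ne]; intro he; linarith
    have hc4 : s - i * i ≤ i := by linarith
    rw [PySem.List.pyRange_one_cons (by linarith), List.foldl_cons]
    have hstep : bStep dead (acc, i) s
        = (acc ++ [((["M"], s), s), ((["E"], s), s), ((["C"], s), s + 1),
                   ((["P"], s), s), ((["*"], s), dead), (([], s), s)], i) := by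
      simp [bStep, hc1, hc2, hc3, hc4]
    rw [hstep, show s + ((k + 1 : Nat) : Int) = (s + 1) + ((k : Nat) : Int) by push_cast; ring,
        ih (s + 1) _ (by linarith) (by push_cast at hk1 ⊢; linarith)]
    have hv : s ≠ -1 ∧ s + 1 ≠ -1 := by constructor <;> nlinarith
    rw [cRun, List.map_append, ← List.append_assoc]
    congr 2
    simp [rmRow, subst, hv.1, hv.2]

theorem bPRun (k : Nat) (i s dead : Int) (acc : List ((List String × Int) × Int))
    (_hi : 0 ≤ i) (hs : i * i + i < s) (hk : s + k ≤ i * i + 2 * i) :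
    (PySem.List.pyRange s (s + k)).foldl (bStep dead) (acc, i)
      = (acc ++ (pRun s k).map (subst dead), i) := by
  induction k generalizing s acc with
  | zero =>
    rw [show s + ((0 : Nat) : Int) = s by push_cast; ring, PySem.List.pyRange_one_eq_nil le_rfl]
    simp [pRun]
  | succ k ih =>
    have hk1 : (1 : Int) ≤ ((k + 1 : Nat) : Int) := by push_cast; omega
    push_cast at hk
    have hs' : s ≤ i * i + 2 * i - 1 := by linarith
    have hsq : (i + 1) * (i + 1) = i * i + 2 * i + 1 := by ring
    have hc1 : (s == (i + 1) * (i + 1)) = false := by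
      simp only [beq_eq_false_iff_ne]; intro he; rw [hsq] at he; linarith
    have hc2 : (s == 0) = false := by
      simp only [beq_eq_false_iff_ne]; intro he; nlinarith
    have hc3 : (s - i * i == 0) = false := by
      simp only [beq_eq_false_iff_ne]; intro he; linarith
    have hc4 : ¬ (s - i * i ≤ i) := by linarith
    have hc5 : s - i * i < 2 * i := by linarith
    rw [PySem.List.pyRange_one_cons (by linarith), List.foldl_cons]
    have hstep : bStep dead (acc, i) s
        = (acc ++ [((["M"], s), s), ((["E"], s), s), ((["C"], s), s),
                   ((["P"], s), s + 1), ((["*"], s), dead), (([], s), s)], i) := by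
      simp [bStep, hc1, hc2, hc3, hc4, hc5]
    rw [hstep, show s + ((k + 1 : Nat) : Int) = (s + 1) + ((k : Nat) : Int) by push_cast; ring,
        ih (s + 1) _ (by linarith) (by push_cast at hk1 ⊢; linarith)]
    have hv : s ≠ -1 ∧ s + 1 ≠ -1 := by constructor <;> nlinarith
    rw [pRun, List.map_append, ← List.append_assoc]
    congr 2
    simp [rmRow, subst, hv.1, hv.2]

theorem bOuter (m : Nat) (dead : Int) :
    (PySem.List.pyRange 0 (((m : Int) + 1) * ((m : Int) + 1))).foldl (bStep dead) ([], 0)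
      = ((spine m).map (subst dead), (m : Int)) := by
  induction m with
  | zero =>
    rw [show (((0 : Nat) : Int) + 1) * (((0 : Nat) : Int) + 1) = 1 by norm_num,
        show PySem.List.pyRange 0 1 = [0] from by decide]
    simp [bStep, spine, rmRow, subst]
  | succ m ih =>
    have hJ : (0 : Int) ≤ (m : Int) := by positivity
    rw [show ((m + 1 : Nat) : Int) = (m : Int) + 1 by push_cast; ring]
    have hB0 : (0 : Int) ≤ ((m : Int) + 1) * ((m : Int) + 1) := by nlinarith
    have hBX : ((m : Int) + 1) * ((m : Int) + 1) ≤ ((m : Int) + 1 + 1) * ((m : Int) + 1 + 1) := by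
      nlinarith
    rw [PySem.List.pyRange_one_append 0 (((m : Int) + 1) * ((m : Int) + 1)) _ hB0 hBX,
        List.foldl_append, ih]
    have hcons : PySem.List.pyRange (((m : Int) + 1) * ((m : Int) + 1))
        (((m : Int) + 1 + 1) * ((m : Int) + 1 + 1))
        = ((m : Int) + 1) * ((m : Int) + 1) :: PySem.List.pyRange
            (((m : Int) + 1) * ((m : Int) + 1) + 1) (((m : Int) + 1 + 1) * ((m : Int) + 1 + 1)) :=
      PySem.List.pyRange_one_cons (by nlinarith)
    rw [hcons, List.foldl_cons]
    have hMne : (((m : Int) + 1) * ((m : Int) + 1) == 0) = false := by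
      simp only [beq_eq_false_iff_ne]; intro he; nlinarith
    have hstep1 : bStep dead ((spine m).map (subst dead), (m : Int))
        (((m : Int) + 1) * ((m : Int) + 1))
        = ((spine m).map (subst dead) ++
            [((["M"], ((m : Int) + 1) * ((m : Int) + 1)), ((m : Int) + 1) * ((m : Int) + 1) + 1 + 2 * ((m : Int) + 1)),
             ((["E"], ((m : Int) + 1) * ((m : Int) + 1)), ((m : Int) + 1) * ((m : Int) + 1) + 1),
             ((["C"], ((m : Int) + 1) * ((m : Int) + 1)), ((m : Int) + 1) * ((m : Int) + 1)),
             ((["P"], ((m : Int) + 1) * ((m : Int) + 1)), ((m : Int) + 1) * ((m : Int) + 1)),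
             ((["*"], ((m : Int) + 1) * ((m : Int) + 1)), dead),
             (([], ((m : Int) + 1) * ((m : Int) + 1)), ((m : Int) + 1) * ((m : Int) + 1))],
            (m : Int) + 1) := by
      simp [bStep, hMne]
    rw [hstep1]
    have hsplit2 : PySem.List.pyRange (((m : Int) + 1) * ((m : Int) + 1) + 1)
        (((m : Int) + 1 + 1) * ((m : Int) + 1 + 1))
        = PySem.List.pyRange (((m : Int) + 1) * ((m : Int) + 1) + 1)
            ((((m : Int) + 1) * ((m : Int) + 1) + 1) + ((m + 1 : Nat) : Int))
          ++ PySem.List.pyRange ((((m : Int) + 1) * ((m : Int) + 1) + 1) + ((m + 1 : Nat) : Int))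
            (((m : Int) + 1 + 1) * ((m : Int) + 1 + 1)) :=
      PySem.List.pyRange_one_append _ _ _ (by push_cast; nlinarith) (by push_cast; nlinarith)
    rw [hsplit2, List.foldl_append]
    rw [bCRun (m + 1) ((m : Int) + 1) _ dead _ (by linarith)
        (by nlinarith) (by push_cast; nlinarith)]
    have hsplit3 : PySem.List.pyRange ((((m : Int) + 1) * ((m : Int) + 1) + 1) + ((m + 1 : Nat) : Int))
        (((m : Int) + 1 + 1) * ((m : Int) + 1 + 1))
        = PySem.List.pyRange ((((m : Int) + 1) * ((m : Int) + 1) + 1) + ((m + 1 : Nat) : Int))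
            (((((m : Int) + 1) * ((m : Int) + 1) + 1) + ((m + 1 : Nat) : Int)) + ((m : Nat) : Int))
          ++ PySem.List.pyRange (((((m : Int) + 1) * ((m : Int) + 1) + 1) + ((m + 1 : Nat) : Int)) + ((m : Nat) : Int))
            (((m : Int) + 1 + 1) * ((m : Int) + 1 + 1)) :=
      PySem.List.pyRange_one_append _ _ _ (by push_cast; nlinarith) (by push_cast; nlinarith)
    rw [hsplit3, List.foldl_append]
    rw [bPRun m ((m : Int) + 1) _ dead _ (by linarith)
        (by push_cast; nlinarith) (by push_cast; nlinarith)]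
    have hlast : PySem.List.pyRange (((((m : Int) + 1) * ((m : Int) + 1) + 1) + ((m + 1 : Nat) : Int)) + ((m : Nat) : Int))
        (((m : Int) + 1 + 1) * ((m : Int) + 1 + 1))
        = [((((m : Int) + 1) * ((m : Int) + 1) + 1) + ((m + 1 : Nat) : Int)) + ((m : Nat) : Int)] := by
      rw [PySem.List.pyRange_one_cons (by push_cast; nlinarith),
          PySem.List.pyRange_one_eq_nil (by push_cast; nlinarith)]
    rw [hlast, List.foldl_cons, List.foldl_nil]
    -- evaluate the step at the last state of the block
    have hT : ((((m : Int) + 1) * ((m : Int) + 1) + 1) + ((m + 1 : Nat) : Int)) + ((m : Nat) : Int)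
        = ((m : Int) + 1) * ((m : Int) + 1) + 2 * ((m : Int) + 1) := by push_cast; ring
    rw [hT]
    have hd1 : (((m : Int) + 1) * ((m : Int) + 1) + 2 * ((m : Int) + 1)
        == ((m : Int) + 1 + 1) * ((m : Int) + 1 + 1)) = false := by
      simp only [beq_eq_false_iff_ne]; intro he; nlinarith
    have hd2 : (((m : Int) + 1) * ((m : Int) + 1) + 2 * ((m : Int) + 1) == 0) = false := by
      simp only [beq_eq_false_iff_ne]; intro he; nlinarith
    have hd3 : (((m : Int) + 1) * ((m : Int) + 1) + 2 * ((m : Int) + 1)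
        - ((m : Int) + 1) * ((m : Int) + 1) == 0) = false := by
      simp only [beq_eq_false_iff_ne]; intro he; nlinarith
    have hd4 : ¬ (((m : Int) + 1) * ((m : Int) + 1) + 2 * ((m : Int) + 1)
        - ((m : Int) + 1) * ((m : Int) + 1) ≤ (m : Int) + 1) := by intro he; nlinarith
    have hd5 : ¬ (((m : Int) + 1) * ((m : Int) + 1) + 2 * ((m : Int) + 1)
        - ((m : Int) + 1) * ((m : Int) + 1) < 2 * ((m : Int) + 1)) := by intro he; nlinarith
    simp only [bStep, hd1, hd2, hd3, hd4, hd5, if_false, Bool.false_eq_true]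
    rw [show spine (m + 1) = spine m ++ blockA (m + 1) (((m : Int) + 1) * ((m : Int) + 1)) from rfl]
    rw [List.map_append]
    rw [show blockA (m + 1) (((m : Int) + 1) * ((m : Int) + 1))
        = rmRow (((m : Int) + 1) * ((m : Int) + 1))
            (((m : Int) + 1) * ((m : Int) + 1) + 1 + 2 * ((m + 1 : Nat) : Int))
            (((m : Int) + 1) * ((m : Int) + 1) + 1) (((m : Int) + 1) * ((m : Int) + 1))
            (((m : Int) + 1) * ((m : Int) + 1)) (-1)
          ++ cRun (((m : Int) + 1) * ((m : Int) + 1) + 1) (m + 1)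
          ++ (pRun (((m : Int) + 1) * ((m : Int) + 1) + 1 + ((m + 1 : Nat) : Int)) m
              ++ rmRow (((m : Int) + 1) * ((m : Int) + 1) + 1 + ((m + 1 : Nat) : Int) + ((m : Nat) : Int))
                  (((m : Int) + 1) * ((m : Int) + 1) + 1 + ((m + 1 : Nat) : Int) + ((m : Nat) : Int))
                  (((m : Int) + 1) * ((m : Int) + 1) + 1 + ((m + 1 : Nat) : Int) + ((m : Nat) : Int))
                  (((m : Int) + 1) * ((m : Int) + 1) + 1 + ((m + 1 : Nat) : Int) + ((m : Nat) : Int))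
                  (-1) (-1)) from rfl]
    rw [List.map_append, List.map_append, List.map_append]
    rw [map_subst_rmRow dead _ _ _ _ _ (by push_cast; nlinarith) (by nlinarith)
        (by nlinarith) (by nlinarith) (by nlinarith)]
    rw [map_subst_rmRow_last dead _ (by push_cast; nlinarith)]
    congr 1
    simp only [← List.append_assoc]
    push_cast
    ring_nf

theorem nodup_keys_append {L1 L2 : List ((List String × Int) × Int)}
    (h1 : (L1.map Prod.fst).Nodup) (h2 : (L2.map Prod.fst).Nodup)
    (hd : ∀ p ∈ L1, ∀ q ∈ L2, p.1.2 ≠ q.1.2) : ((L1 ++ L2).map Prod.fst).Nodup := by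
  rw [List.map_append, List.nodup_append]
  refine ⟨h1, h2, ?_⟩
  intro a ha b hb he
  rcases List.mem_map.mp ha with ⟨p, hp, rfl⟩
  rcases List.mem_map.mp hb with ⟨q, hq, rfl⟩
  exact hd p hp q hq (congrArg Prod.snd he)

theorem nodup_rmRow (s mt et ct pt star : Int) :
    ((rmRow s mt et ct pt star).map Prod.fst).Nodup := by
  simp [rmRow]

theorem nodup_cRun (n : Nat) : ∀ s : Int, ((cRun s n).map Prod.fst).Nodup := by
  induction n with
  | zero => intro s; simp [cRun]
  | succ n ih =>
    intro s
    rw [cRun]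
    refine nodup_keys_append (nodup_rmRow _ _ _ _ _ _) (ih (s + 1)) ?_
    intro p hp q hq
    have h1 := mem_rmRow_snd hp
    have h2 := mem_cRun_snd hq
    omega

theorem nodup_pRun (n : Nat) : ∀ s : Int, ((pRun s n).map Prod.fst).Nodup := by
  induction n with
  | zero => intro s; simp [pRun]
  | succ n ih =>
    intro s
    rw [pRun]
    refine nodup_keys_append (nodup_rmRow _ _ _ _ _ _) (ih (s + 1)) ?_
    intro p hp q hq
    have h1 := mem_rmRow_snd hp
    have h2 := mem_pRun_snd hq
    omega

theorem nodup_pRunA (n : Nat) (s : Int) : ((pRunA s n).map Prod.fst).Nodup := by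
  cases n with
  | zero => simp [pRunA]
  | succ n =>
    rw [pRunA]
    refine nodup_keys_append (nodup_pRun n s) (nodup_rmRow _ _ _ _ _ _) ?_
    intro p hp q hq
    have h1 := mem_pRun_snd hp
    have h2 := mem_rmRow_snd hq
    omega

theorem nodup_blockA (i : Nat) (s : Int) : ((blockA i s).map Prod.fst).Nodup := by
  rw [blockA, List.append_assoc]
  refine nodup_keys_append (nodup_rmRow _ _ _ _ _ _) ?_ ?_
  · refine nodup_keys_append (nodup_cRun i (s + 1)) (nodup_pRunA i (s + 1 + i)) ?_
    intro p hp q hq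
    have h1 := mem_cRun_snd hp
    have h2 := mem_pRunA_snd hq
    omega
  · intro p hp q hq
    have h1 := mem_rmRow_snd hp
    rcases List.mem_append.mp hq with hq | hq
    · have h2 := mem_cRun_snd hq; omega
    · have h2 := mem_pRunA_snd hq; omega

theorem nodup_spine (m : Nat) : ((spine m).map Prod.fst).Nodup := by
  induction m with
  | zero => exact nodup_rmRow _ _ _ _ _ _
  | succ m ih =>
    rw [spine]
    refine nodup_keys_append ih (nodup_blockA _ _) ?_
    intro p hp q hq
    have h1 := mem_spine_snd hp
    have h2 := mem_blockA_snd hq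
    have hJ : (0 : Int) ≤ (m : Int) := by positivity
    nlinarith [h1.2, h2.1]

theorem keys_map_subst (dead : Int) (L : List ((List String × Int) × Int)) :
    ((L.map (subst dead)).map Prod.fst) = L.map Prod.fst := by
  rw [List.map_map]
  apply List.map_congr_left
  intro p _
  simp [subst, apply_ite Prod.fst]

theorem items_ofList_nodup (L : List ((List String × Int) × Int))
    (h : (L.map Prod.fst).Nodup) : (PySem.Dict.ofList L).items = L := by
  have := PySem.Dict.items_foldl_insert_fresh L Prod.fst Prod.snd PySem.Dict.empty
    (fun a _ => PySem.Dict.contains_empty a.1) h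
  simpa [PySem.Dict.ofList, PySem.Dict.update] using this

theorem aEval (m : Nat) :
    compute_rm_transitions_py (m : Int)
      = ((spine m).map (subst (((m : Int) + 1) * ((m : Int) + 1)))).map
          (fun kv => (kv.1.1, kv.1.2, kv.2)) := by
  show (((PySem.List.pyRange 1 ((m : Int) + 1)).foldl aBlock (aInit, 1)).1.items.map
      (fun kv => if kv.2 = -1
        then (kv.1, ((PySem.List.pyRange 1 ((m : Int) + 1)).foldl aBlock (aInit, 1)).2)
        else kv)).map (fun kv => (kv.1.1, kv.1.2, kv.2)) = _
  rw [aOuter m]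
  rfl

theorem bEvalPos (m : Nat) (hm : (0 : Int) < (m : Int)) :
    compute_rm_transitions_py_alt (m : Int)
      = ((spine m).map (subst (((m : Int) + 1) * ((m : Int) + 1)))).map
          (fun kv => (kv.1.1, kv.1.2, kv.2)) := by
  show (PySem.Dict.ofList ((PySem.List.pyRange 0
      (((if (m : Int) > 0 then (m : Int) else 0) + 1) * ((if (m : Int) > 0 then (m : Int) else 0) + 1))).foldl
        (bStep (((if (m : Int) > 0 then (m : Int) else 0) + 1) * ((if (m : Int) > 0 then (m : Int) else 0) + 1)))
        ([], 0)).1).items.map (fun kv => (kv.1.1, kv.1.2, kv.2)) = _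
  rw [if_pos hm, bOuter m]
  rw [items_ofList_nodup _ (by rw [keys_map_subst]; exact nodup_spine m)]

-- ===== VERDICT (by name: the statement is the Claim_ definition above) =====
theorem compute_rm_transitions_py_spec : Claim_equal_compute_rm_transitions_py := by
  intro max_n _
  unfold Spec_compute_rm_transitions_py
  by_cases h : 0 < max_n
  · obtain ⟨m, rfl⟩ : ∃ m : Nat, max_n = (m : Int) :=
      ⟨max_n.toNat, (Int.toNat_of_nonneg (by omega)).symm⟩
    rw [aEval m, bEvalPos m (by exact_mod_cast h)]
  · have hA : compute_rm_transitions_py max_n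
        = ((spine 0).map (subst 1)).map (fun kv => (kv.1.1, kv.1.2, kv.2)) := by
      show (((PySem.List.pyRange 1 (max_n + 1)).foldl aBlock (aInit, 1)).1.items.map
          (fun kv => if kv.2 = -1
            then (kv.1, ((PySem.List.pyRange 1 (max_n + 1)).foldl aBlock (aInit, 1)).2)
            else kv)).map (fun kv => (kv.1.1, kv.1.2, kv.2)) = _
      rw [PySem.List.pyRange_one_eq_nil (by omega)]
      decide
    have hB : compute_rm_transitions_py_alt max_n
        = ((spine 0).map (subst 1)).map (fun kv => (kv.1.1, kv.1.2, kv.2)) := by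
      show (PySem.Dict.ofList ((PySem.List.pyRange 0
          (((if max_n > 0 then max_n else 0) + 1) * ((if max_n > 0 then max_n else 0) + 1))).foldl
            (bStep (((if max_n > 0 then max_n else 0) + 1) * ((if max_n > 0 then max_n else 0) + 1)))
            ([], 0)).1).items.map (fun kv => (kv.1.1, kv.1.2, kv.2)) = _
      rw [if_neg h]
      decide
    rw [hA, hB]
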